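-- pv_equiv track=rewrite | github.com/anthonyzhub/Cracking-the-Coding-Interview-Problems | Arrays & Strings/String Rotation.py | solOne
-- ===== SOURCE A (Python) =====
-- def solOne(str1, str2):
--
--     # OBJECTIVE: Rotate either string until they both look the same (erbottlewat == waterbottle)
--     # NOTE: This is a permutation problem:
--
--     """
--     bottlewater == ber                    rbottlewate
--                         bottlewater
--                         ottlewaterb
--                         ttlewaterbo
--                         tlewaterbot
--                         lewaterbott
--                         ewaterbottl
--                         waterbottle
--     """
--
--     # If both strings aren't equal in length, exit function
--     if len(str1) != len(str2):
--         return False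
--
--     # Turn both strings into a list
--     str1_list = list(str1)
--     str2_list = list(str2)
--
--     # Traverse str1
--     for _ in range(len(str1_list)):
--
--         # If both letters don't match, pop letter from str1 and append it
--         if str1_list[0] != str2_list[0]:
--
--             # Pop element and add it at the back
--             tmp = str1_list.pop(0)
--             str1_list.append(tmp)
--
--     return str1_list == str2_list
-- ===== SOURCE B (Python) =====
-- def solOne(str1, str2):
--     # Find the rotation offset once, then do a single slice comparison,
--     # instead of repeatedly pop(0)/append-ing.
--     if len(str1) != len(str2):
--         return False
--     if not str1:
--         return True
--     k = str1.find(str2[0])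
--     if k == -1:
--         return False
--     return str1[k:] + str1[:k] == str2
-- ===== Notes on version B (the rewrite author's own statement) =====
-- stated objective: faster
-- what changed: Replaces the n-step pop(0)/append rotation loop over lists with a single str.find of str2's first character and one slice-rotation comparison on the strings.
import Mathlib
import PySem

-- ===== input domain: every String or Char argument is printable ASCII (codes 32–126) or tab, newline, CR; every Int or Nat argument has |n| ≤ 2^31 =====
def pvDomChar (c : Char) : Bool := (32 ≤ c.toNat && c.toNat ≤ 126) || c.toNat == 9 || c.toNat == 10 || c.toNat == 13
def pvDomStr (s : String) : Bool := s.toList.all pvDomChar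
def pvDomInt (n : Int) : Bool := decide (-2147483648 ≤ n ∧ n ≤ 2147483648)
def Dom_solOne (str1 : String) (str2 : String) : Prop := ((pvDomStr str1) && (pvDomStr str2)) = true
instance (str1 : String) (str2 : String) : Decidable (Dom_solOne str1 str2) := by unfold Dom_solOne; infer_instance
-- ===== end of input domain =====

-- B replaces A's repeated pop(0)/append rotation loop by computing the rotation
-- offset once with str.find and doing a single slice comparison (faster in a timing run).


-- ===== PORT A =====
-- one loop iteration: if fronts differ, pop str1_list[0] and append it at the back
-- ([] cases are unreachable in the loop: it runs only when both lists are nonempty)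
def pvStepA (l2 l1 : List Char) : List Char :=
  match l1, l2 with
  | a :: t, b :: _ => if a ≠ b then t ++ [a] else a :: t
  | _, _ => l1

def solOne (str1 : String) (str2 : String) : Bool :=
  if str1.toList.length ≠ str2.toList.length then false
  else
    decide ((List.range str1.toList.length).foldl
      (fun l1 _ => pvStepA str2.toList l1) str1.toList = str2.toList)

-- ===== PORT B =====
def solOne_alt (str1 : String) (str2 : String) : Bool :=
  if str1.toList.length ≠ str2.toList.length then false
  else if str1.toList.isEmpty then true
  else
    match str2.toList with
    | [] => false   -- unreachable: equal lengths and str1 nonempty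
    | c :: _ =>     -- c = str2[0]
      -- k = str1.find(str2[0]): PySem.Chars.find on the character lists (exact)
      let k := PySem.Chars.find str1.toList [c]
      if k = -1 then false
      else
        -- str1[k:] + str1[:k] == str2 with 0 ≤ k: slicing = drop/take (PySem.List.slice_from/slice_to)
        decide (str1.toList.drop k.toNat ++ str1.toList.take k.toNat = str2.toList)

-- ===== PRECONDITION & SPEC =====
def Spec_solOne (str1 : String) (str2 : String) (out : Bool) : Prop := out = solOne_alt str1 str2
instance (str1 : String) (str2 : String) (out : Bool) : Decidable (Spec_solOne str1 str2 out) := by unfold Spec_solOne; infer_instance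

-- ===== CLAIM (what is proved, stated in full; the proofs are below) =====
def Claim_equal_solOne : Prop := ∀ (str1 : String) (str2 : String), Dom_solOne str1 str2 → Spec_solOne str1 str2 (solOne str1 str2)

-- ===== LEMMAS AND PROOFS =====

-- one step of A's loop advances the rotation while the front differs from c …
lemma pvRot_step (l : List Char) (c : Char) (r : List Char) (j : Nat)
    (hj : j < l.length) (hne : l[j] ≠ c) :
    pvStepA (c :: r) (l.drop j ++ l.take j) = l.drop (j + 1) ++ l.take (j + 1) := by
  have ht : l.take (j + 1) = l.take j ++ [l[j]] := by
    rw [List.take_add_one, List.getElem?_eq_getElem hj]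
    rfl
  rw [List.drop_eq_getElem_cons hj, List.cons_append]
  simp only [pvStepA]
  rw [if_pos hne, ht, List.append_assoc]

-- … and is a fixpoint once the front equals c
lemma pvRot_fix (l : List Char) (c : Char) (r : List Char) (j : Nat)
    (hj : j < l.length) (heq : l[j] = c) :
    pvStepA (c :: r) (l.drop j ++ l.take j) = l.drop j ++ l.take j := by
  rw [List.drop_eq_getElem_cons hj]
  simp [pvStepA, heq]

-- loop invariant: after i iterations the state is the rotation by min i k,
-- where k is the first position whose character is c (k = length if absent)
lemma pvLoop (l : List Char) (c : Char) (r : List Char) (k : Nat) (hk : k ≤ l.length)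
    (H1 : ∀ j (hj : j < l.length), j < k → l[j] ≠ c)
    (H2 : ∀ h : k < l.length, l[k] = c) :
    ∀ i, i ≤ l.length →
      (List.range i).foldl (fun s _ => pvStepA (c :: r) s) l
        = l.drop (min i k) ++ l.take (min i k) := by
  intro i
  induction i with
  | zero => simp
  | succ i ih =>
    intro hi
    rw [List.range_succ, List.foldl_append, ih (by omega)]
    simp only [List.foldl_cons, List.foldl_nil]
    by_cases hik : i < k
    · have hil : i < l.length := by omega
      have : min i k = i := by omega
      rw [this, pvRot_step l c r i hil (H1 i hil hik)]
      have : min (i + 1) k = i + 1 := by omega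
      rw [this]
    · have hkl : k < l.length := by omega
      have h1 : min i k = k := by omega
      have h2 : min (i + 1) k = k := by omega
      rw [h1, h2, pvRot_fix l c r k hkl (H2 hkl)]

-- a one-character pattern is a prefix of l.drop i exactly when l[i] is that character
lemma pvSinglePrefix (l : List Char) (c : Char) (i : Nat) :
    [c] <+: l.drop i ↔ ∃ h : i < l.length, l[i] = c := by
  constructor
  · intro hp
    obtain ⟨t, ht⟩ := hp
    have hlen : i < l.length := by
      have := congrArg List.length ht
      simp at this
      omega
    refine ⟨hlen, ?_⟩
    rw [List.drop_eq_getElem_cons hlen] at ht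
    injection ht with h1 _
    exact h1.symm
  · rintro ⟨h, hc⟩
    exact ⟨l.drop (i + 1), by rw [List.drop_eq_getElem_cons h, hc]; rfl⟩

-- str.find of the single character c lands on the first index of c …
lemma pvFindSome (l : List Char) (c : Char) (k : Nat)
    (hidx : PySem.List.index? l c = some k) :
    PySem.Chars.find l [c] = (k : Int) := by
  obtain ⟨hkl, hck, hbef⟩ := PySem.List.getElem_of_index?_eq_some hidx
  have hinf : [c] <:+: l :=
    List.infix_iff_prefix_suffix.mpr
      ⟨l.drop k, (pvSinglePrefix l c k).mpr ⟨hkl, hck⟩, List.drop_suffix k l⟩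
  have hge : 0 ≤ PySem.Chars.find l [c] := (PySem.Chars.find_nonneg_iff _ _).mpr hinf
  obtain ⟨hpre, hmin⟩ := PySem.Chars.find_spec hge
  obtain ⟨hml, hmc⟩ := (pvSinglePrefix l c (PySem.Chars.find l [c]).toNat).mp hpre
  have hm : (PySem.Chars.find l [c]).toNat = k := by
    rcases lt_trichotomy (PySem.Chars.find l [c]).toNat k with h | h | h
    · exact absurd hmc (hbef _ h)
    · exact h
    · exact absurd ((pvSinglePrefix l c k).mpr ⟨hkl, hck⟩) (hmin k h)
  omega

-- … and is -1 exactly when c does not occur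
lemma pvFindNone (l : List Char) (c : Char)
    (hidx : PySem.List.index? l c = none) :
    PySem.Chars.find l [c] = -1 := by
  apply (PySem.Chars.find_eq_neg_one_iff _ _).mpr
  intro hinf
  exact (PySem.List.index?_eq_none_iff _ _).mp hidx (hinf.subset (List.mem_singleton_self c))

-- A's loop ends at the rotation by the first index of c (B's index() offset) …
lemma pvKeySome (a c : Char) (t r : List Char) (k : Nat)
    (hidx : PySem.List.index? (a :: t) c = some k) :
    decide ((List.range (a :: t).length).foldl (fun s _ => pvStepA (c :: r) s) (a :: t) = c :: r)
      = decide (List.drop k (a :: t) ++ List.take k (a :: t) = c :: r) := by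
  obtain ⟨hkl, hck, hbefore⟩ := PySem.List.getElem_of_index?_eq_some hidx
  rw [pvLoop (a :: t) c r k (le_of_lt hkl)
        (fun j hj hjk => hbefore j hjk) (fun _ => hck)
        ((a :: t).length) (le_refl _)]
  have hmin : min (a :: t).length k = k := by omega
  rw [hmin]

-- … and if c does not occur, n rotations restore the original list, which differs from c :: r
lemma pvKeyNone (a c : Char) (t r : List Char)
    (hidx : PySem.List.index? (a :: t) c = none) :
    decide ((List.range (a :: t).length).foldl (fun s _ => pvStepA (c :: r) s) (a :: t) = c :: r)
      = false := by
  have hnmem : c ∉ a :: t := (PySem.List.index?_eq_none_iff _ _).mp hidx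
  rw [pvLoop (a :: t) c r ((a :: t).length) (le_refl _)
        (fun j hj _ hc => hnmem (hc ▸ List.getElem_mem hj))
        (fun h => absurd h (lt_irrefl _))
        ((a :: t).length) (le_refl _)]
  simp only [min_self, List.drop_length, List.take_length, List.nil_append]
  have hne : (a :: t) ≠ c :: r := fun he => hnmem (by rw [he]; exact List.mem_cons_self ..)
  exact decide_eq_false hne

-- ===== VERDICT (by name: the statement is the Claim_ definition above) =====
theorem solOne_spec : Claim_equal_solOne := by
  intro str1 str2 _
  unfold Spec_solOne solOne solOne_alt
  by_cases h : str1.toList.length = str2.toList.length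
  · rw [if_neg (not_not_intro h), if_neg (not_not_intro h)]
    cases h1 : str1.toList with
    | nil =>
      have h2 : str2.toList = [] := List.eq_nil_of_length_eq_zero (h1 ▸ h).symm
      rw [h2]
      simp
    | cons a t =>
      cases h2 : str2.toList with
      | nil => rw [h1, h2] at h; simp at h
      | cons c r =>
        simp only [List.isEmpty_cons, Bool.false_eq_true, if_false]
        cases hidx : PySem.List.index? (a :: t) c with
        | some k =>
          rw [pvKeySome a c t r k hidx]
          simp only [pvFindSome (a :: t) c k hidx]
          have hne : ¬((k : Int) = -1) := by omega
          simp [hne]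
        | none =>
          rw [pvKeyNone a c t r hidx]
          simp [pvFindNone (a :: t) c hidx]
  · rw [if_pos h, if_pos h]
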